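-- pv_equiv track=rewrite | github.com/xaidarino/tesp-app | main.py | findLongestDecreasingSequence
-- ===== SOURCE A (Python) =====
-- def findLongestDecreasingSequence(array):
--     currentSequence = [array[0]]
--     longestSequence = []
--
--     for i in range(1, len(array)):
--         if array[i] <= array[i - 1]:
--             currentSequence.append(array[i])
--         else:
--             if len(currentSequence) > len(longestSequence):
--                 longestSequence = currentSequence
--             currentSequence = [array[i]]
--
--     if len(currentSequence) > len(longestSequence):
--         longestSequence = currentSequence
--
--     return longestSequence
-- ===== SOURCE B (Python) =====
-- def findLongestDecreasingSequence(array):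
--     # Recursive decomposition: peel off the first maximal non-increasing run,
--     # recurse on the remainder, keep the earlier run on ties.
--     run = [array[0]]
--     for x in array[1:]:
--         if x <= run[-1]:
--             run.append(x)
--         else:
--             break
--     rest = array[len(run):]
--     if not rest:
--         return run
--     best = findLongestDecreasingSequence(rest)
--     return run if len(best) <= len(run) else best
-- ===== Notes on version B (the rewrite author's own statement) =====
-- stated objective: alternative
-- what changed: B is recursive: it peels off the first maximal non-increasing run, slices the array, recurses on the remainder and compares just two candidates per level, instead of A's single iterative pass carrying a current/longest state pair over all indices.
import Mathlib
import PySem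

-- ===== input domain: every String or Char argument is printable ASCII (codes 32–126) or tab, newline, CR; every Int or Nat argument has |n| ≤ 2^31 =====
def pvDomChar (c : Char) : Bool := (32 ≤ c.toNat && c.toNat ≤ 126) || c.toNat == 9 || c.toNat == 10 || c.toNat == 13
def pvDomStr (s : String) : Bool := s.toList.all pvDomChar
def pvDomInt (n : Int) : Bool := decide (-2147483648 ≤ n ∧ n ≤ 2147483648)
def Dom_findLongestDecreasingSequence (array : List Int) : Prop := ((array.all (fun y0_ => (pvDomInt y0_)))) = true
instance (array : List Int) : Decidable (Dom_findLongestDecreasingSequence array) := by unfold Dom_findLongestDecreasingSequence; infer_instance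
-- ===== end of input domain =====

-- B replaces A's one-pass current/longest accumulator with a recursion that peels off the
-- first maximal non-increasing run and recurses on the remainder; same O(n) cost, different decomposition.
-- Pre_ excludes only the empty list, on which both Pythons raise.

-- ===== PORT A =====
-- loop body of A: state = (currentSequence, longestSequence)
def pvStepA (array : List Int) (st : List Int × List Int) (i : Int) : List Int × List Int :=
  if PySem.List.pyGetD array i 0 ≤ PySem.List.pyGetD array (i - 1) 0 then
    (st.1 ++ [PySem.List.pyGetD array i 0], st.2)
  else if st.2.length < st.1.length then ([PySem.List.pyGetD array i 0], st.1)
  else ([PySem.List.pyGetD array i 0], st.2)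

def findLongestDecreasingSequence (array : List Int) : List Int :=
  match PySem.List.pyGet? array 0 with
  | none => []  -- IndexError in Python: excluded by Pre_
  | some a0 =>
    let st := (PySem.List.pyRange 1 array.length 1).foldl (pvStepA array) ([a0], [])
    if st.2.length < st.1.length then st.1 else st.2

-- ===== PORT B =====
-- B's for-loop over array[1:] with break, keeping run's last element as `prev`
def pvFirstRun : Int → List Int → List Int
  | _, [] => []
  | prev, x :: xs => if x ≤ prev then x :: pvFirstRun x xs else []

def findLongestDecreasingSequence_alt (array : List Int) : List Int :=
  match array with
  | [] => []  -- IndexError in Python (array[0]): excluded by Pre_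
  | a :: rest =>
    let run := a :: pvFirstRun a rest
    let rest' := rest.drop (pvFirstRun a rest).length  -- rest = array[len(run):]
    if rest' = [] then run
    else
      let best := findLongestDecreasingSequence_alt rest'
      if best.length ≤ run.length then run else best
termination_by array.length
decreasing_by
  simp only [List.length_cons, List.length_drop]
  omega

-- ===== PRECONDITION & SPEC =====
-- Pre_ excludes exactly the empty list, on which A raises IndexError (array[0]).
def Pre_findLongestDecreasingSequence (array : List Int) : Prop := array ≠ []
instance (array : List Int) : Decidable (Pre_findLongestDecreasingSequence array) := by unfold Pre_findLongestDecreasingSequence; infer_instance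
def pvWitness_findLongestDecreasingSequence : List Int := [3, 2, 5]
def Spec_findLongestDecreasingSequence (array : List Int) (out : List Int) : Prop := out = findLongestDecreasingSequence_alt array
instance (array : List Int) (out : List Int) : Decidable (Spec_findLongestDecreasingSequence array out) := by unfold Spec_findLongestDecreasingSequence; infer_instance

-- ===== CLAIM =====
def Claim_equal_findLongestDecreasingSequence : Prop := ∀ (array : List Int), Dom_findLongestDecreasingSequence array → Pre_findLongestDecreasingSequence array → Spec_findLongestDecreasingSequence array (findLongestDecreasingSequence array)

-- ===== LEMMAS AND PROOFS =====

-- A's final step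
def pvAfin (st : List Int × List Int) : List Int :=
  if st.2.length < st.1.length then st.1 else st.2

-- A's loop, restated structurally over the remaining elements with the previous element carried
def pvLoop2 : Int → List Int → List Int × List Int → List Int × List Int
  | _, [], st => st
  | prev, x :: xs, st =>
      pvLoop2 x xs (if x ≤ prev then (st.1 ++ [x], st.2) else ([x], pvAfin st))

-- bridge: A's index fold over pyRange equals the structural loop
lemma pvBridge (array : List Int) :
    ∀ (n k : Nat) (st : List Int × List Int), 1 ≤ k → array.length ≤ k + n →
      (PySem.List.pyRange k array.length 1).foldl (pvStepA array) st
        = pvLoop2 (array.getD (k - 1) 0) (array.drop k) st := by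
  intro n
  induction n with
  | zero =>
    intro k st hk hlen
    rw [PySem.List.pyRange_one_eq_nil (by exact_mod_cast hlen)]
    rw [List.drop_eq_nil_of_le (by omega)]
    rfl
  | succ n ih =>
    intro k st hk hlen
    by_cases h : array.length ≤ k
    · rw [PySem.List.pyRange_one_eq_nil (by exact_mod_cast h)]
      rw [List.drop_eq_nil_of_le h]
      rfl
    · push_neg at h
      rw [PySem.List.pyRange_one_cons (by exact_mod_cast h)]
      rw [List.foldl_cons]
      have hcast : ((k : Int) + 1) = ((k + 1 : Nat) : Int) := by push_cast; ring
      have hdrop : array.drop k = array[k] :: array.drop (k + 1) :=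
        List.drop_eq_getElem_cons h
      have hget : PySem.List.pyGetD array (k : Int) 0 = array[k] := by
        rw [PySem.List.pyGetD_eq_getElem array (i := (k : Int)) 0 (by omega) (by exact_mod_cast h)]
        simp
      have hget' : PySem.List.pyGetD array ((k : Int) - 1) 0 = array.getD (k - 1) 0 := by
        rw [PySem.List.pyGetD_eq_getElem array (i := (k : Int) - 1) 0 (by omega) (by omega)]
        rw [List.getD_eq_getElem _ _ (by omega)]
        congr 1
        omega
      have hgd : array.getD (k + 1 - 1) 0 = array[k] := by
        rw [List.getD_eq_getElem _ _ (by omega)]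
        congr 1
      rw [hcast, ih (k + 1) _ (by omega) (by omega), hgd, hdrop]
      show pvLoop2 array[k] (array.drop (k + 1)) (pvStepA array st (k : Int))
        = pvLoop2 array[k] (array.drop (k + 1))
            (if array[k] ≤ array.getD (k - 1) 0 then (st.1 ++ [array[k]], st.2)
             else ([array[k]], pvAfin st))
      congr 1
      unfold pvStepA pvAfin
      rw [hget, hget']
      split_ifs <;> rfl

-- split lemma: pvAfin ∘ pvLoop2 processes one maximal run at a time
lemma pvSplit : ∀ (rest : List Int) (prev : Int) (cur long : List Int),
    pvAfin (pvLoop2 prev rest (cur, long)) =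
      (match rest.drop (pvFirstRun prev rest).length with
       | [] => if long.length < (cur ++ pvFirstRun prev rest).length
               then cur ++ pvFirstRun prev rest else long
       | b :: rest'' =>
           pvAfin (pvLoop2 b rest''
             ([b], if long.length < (cur ++ pvFirstRun prev rest).length
                   then cur ++ pvFirstRun prev rest else long))) := by
  intro rest
  induction rest with
  | nil => intro prev cur long; simp [pvFirstRun, pvLoop2, pvAfin]
  | cons x xs ih =>
    intro prev cur long
    by_cases hx : x ≤ prev
    · have hfr : pvFirstRun prev (x :: xs) = x :: pvFirstRun x xs := by
        simp [pvFirstRun, hx]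
      rw [hfr]
      have hl : pvLoop2 prev (x :: xs) (cur, long) = pvLoop2 x xs (cur ++ [x], long) := by
        simp [pvLoop2, hx]
      rw [hl, ih x (cur ++ [x]) long]
      simp
    · have hfr : pvFirstRun prev (x :: xs) = [] := by
        simp [pvFirstRun, hx]
      rw [hfr]
      have hl : pvLoop2 prev (x :: xs) (cur, long) = pvLoop2 x xs ([x], pvAfin (cur, long)) := by
        simp [pvLoop2, hx]
      rw [hl]
      simp [pvAfin]

-- B's result is never empty on a nonempty list
lemma pvAltNe : ∀ (n : Nat) (array : List Int), array.length ≤ n → array ≠ [] →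
    findLongestDecreasingSequence_alt array ≠ [] := by
  intro n
  induction n with
  | zero => intro array hlen hne; cases array <;> simp_all
  | succ n ih =>
    intro array hlen hne
    match array with
    | a :: rest =>
      rw [findLongestDecreasingSequence_alt]
      simp only []
      split_ifs with h1 h2
      · simp
      · simp
      · apply ih
        · have h1' : (rest.drop (pvFirstRun a rest).length).length = rest.length - (pvFirstRun a rest).length := List.length_drop
          simp at hlen
          omega
        · exact h1

-- A's accumulator form equals B's recursive form, for every carried `long`
lemma pvMain : ∀ (n : Nat) (rest : List Int), rest.length ≤ n → ∀ (a : Int) (long : List Int),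
    pvAfin (pvLoop2 a rest ([a], long)) =
      (if long.length < (findLongestDecreasingSequence_alt (a :: rest)).length
       then findLongestDecreasingSequence_alt (a :: rest) else long) := by
  intro n
  induction n with
  | zero =>
    intro rest hlen a long
    have : rest = [] := List.length_eq_zero_iff.mp (by omega)
    subst this
    simp [pvLoop2, pvAfin, findLongestDecreasingSequence_alt, pvFirstRun]
  | succ n ih =>
    intro rest hlen a long
    rw [pvSplit rest a [a] long]
    have hb : findLongestDecreasingSequence_alt (a :: rest) =
        (if rest.drop (pvFirstRun a rest).length = [] then a :: pvFirstRun a rest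
         else
           if (findLongestDecreasingSequence_alt (rest.drop (pvFirstRun a rest).length)).length
               ≤ (a :: pvFirstRun a rest).length
           then a :: pvFirstRun a rest
           else findLongestDecreasingSequence_alt (rest.drop (pvFirstRun a rest).length)) := by
      conv_lhs => rw [findLongestDecreasingSequence_alt]
    cases hdrop : rest.drop (pvFirstRun a rest).length with
    | nil =>
      rw [hb, hdrop]
      simp
    | cons b rest'' =>
      have hlt : rest''.length ≤ n := by
        have h1 : (rest.drop (pvFirstRun a rest).length).length = rest.length - (pvFirstRun a rest).length := List.length_drop
        rw [hdrop] at h1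
        simp at h1
        omega
      show pvAfin (pvLoop2 b rest''
          ([b], if long.length < ([a] ++ pvFirstRun a rest).length
                then [a] ++ pvFirstRun a rest else long)) = _
      rw [ih rest'' hlt b _]
      rw [hb, hdrop]
      simp only [List.cons_append, List.nil_append, List.length_cons]
      split_ifs <;> simp_all <;> omega

-- ===== VERDICT =====
theorem findLongestDecreasingSequence_spec : Claim_equal_findLongestDecreasingSequence := by
  intro array _ hpre
  unfold Spec_findLongestDecreasingSequence
  match array with
  | [] => exact absurd rfl hpre
  | a :: rest =>
    show findLongestDecreasingSequence (a :: rest) = _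
    unfold findLongestDecreasingSequence
    rw [PySem.List.pyGet?_zero_cons]
    simp only []
    have hbr := pvBridge (a :: rest) (a :: rest).length 1 ([a], []) (by omega) (by omega)
    simp only [Nat.cast_one] at hbr
    rw [hbr]
    have hgd : (a :: rest).getD 0 0 = a := rfl
    have hdr : (a :: rest).drop 1 = rest := rfl
    rw [hgd, hdr]
    have := pvMain rest.length rest (le_refl _) a []
    unfold pvAfin at this
    rw [this]
    have hne : findLongestDecreasingSequence_alt (a :: rest) ≠ [] :=
      pvAltNe (a :: rest).length (a :: rest) (le_refl _) (by simp)
    have hlen : 0 < (findLongestDecreasingSequence_alt (a :: rest)).length := by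
      cases h : findLongestDecreasingSequence_alt (a :: rest)
      · exact absurd h hne
      · simp
    simp [hlen]
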